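-- pv_equiv track=rewrite | github.com/ICMLanonymous2026/MRS_YOLO_ICML26 | mrs_yolo/models/Backbones/BranchBackbone.py | stride_schedule
-- ===== SOURCE A (Python) =====
-- import math
-- from typing import List, Tuple
--
-- def stride_schedule(start: Tuple[int, int], target: Tuple[int, int]) -> List[Tuple[int, int]]:
--     """Renvoie la liste des strides (sH, sW) successifs pour passer de start → target."""
--     H, W = start
--     h_t, w_t = target
--     assert H % h_t == 0 and W % w_t == 0, "Les résolutions doivent être des multiples puissances de 2."
--
--     if H>h_t:
--         dh = int(math.log2(H // h_t))  # nombre de /2 sur hauteur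
--     else:
--         dh = int(math.log2(h_t // H))  # nombre de /2 sur hauteur
--     dw = int(math.log2(W // w_t))  # nombre de /2 sur largeurs
--
--     sch = []
--     # Axe qui doit downsimpler le plus = on commence par lui seul
--     if dh < dw:                         # largeur a plus de /2 à faire
--         for _ in range(dw - dh):
--             sch.append((1, 2))          # (H inchangé, W /2)
--     elif dw < dh:                       # hauteur a plus de /2
--         for _ in range(dh - dw):
--             sch.append((2, 1))          # (H /2, W inchangé)
--
--     # Puis downsamples synchrones sur les deux axes
--     for _ in range(min(dh, dw)):
--         sch.append((2, 2))
--
--     return sch  # ex. [(1,2),(1,2),(2,2),(2,2)]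
-- ===== SOURCE B (Python) =====
-- import math
--
--
-- def stride_schedule(start, target):
--     """Renvoie la liste des strides (sH, sW) successifs pour passer de start → target."""
--     H, W = start
--     h_t, w_t = target
--     assert H % h_t == 0 and W % w_t == 0, "Les résolutions doivent être des multiples puissances de 2."
--
--     if H > h_t:
--         dh = int(math.log2(H // h_t))
--     else:
--         dh = int(math.log2(h_t // H))
--     dw = int(math.log2(W // w_t))
--
--     # Two independent per-axis stride sequences, merged pointwise.
--     m = max(dh, dw)
--     sH = [1] * (m - dh) + [2] * dh
--     sW = [1] * (m - dw) + [2] * dw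
--     return list(zip(sH, sW))
-- ===== Notes on version B (the rewrite author's own statement) =====
-- stated objective: alternative
-- what changed: B replaces A's branch-and-append loop phases by building two independent per-axis stride lists ([1]*(m-d)+[2]*d for each axis) and merging them pointwise with zip.
import Mathlib
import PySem

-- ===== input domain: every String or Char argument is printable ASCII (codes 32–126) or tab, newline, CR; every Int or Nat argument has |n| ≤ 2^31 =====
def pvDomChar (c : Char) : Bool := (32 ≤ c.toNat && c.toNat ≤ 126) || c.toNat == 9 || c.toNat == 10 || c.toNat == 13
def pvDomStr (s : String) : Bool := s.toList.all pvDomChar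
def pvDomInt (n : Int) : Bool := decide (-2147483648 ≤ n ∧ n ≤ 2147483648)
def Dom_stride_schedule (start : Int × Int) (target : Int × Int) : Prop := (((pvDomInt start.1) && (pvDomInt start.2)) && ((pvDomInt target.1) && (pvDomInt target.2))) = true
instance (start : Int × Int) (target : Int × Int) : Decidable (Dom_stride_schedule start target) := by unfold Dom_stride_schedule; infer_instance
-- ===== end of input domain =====

-- B recombines two independent per-axis stride sequences with zip instead of A's
-- branch-and-append loop phases; objective: alternative decomposition (same cost).

-- int(math.log2(n)): exact for 1 ≤ n ≤ 2^31 (the domain bound), where the float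
-- log2 truncates to exactly ⌊log2 n⌋; Pre_ excludes n ≤ 0 (Python ValueError).
def pyIlog2 (n : Int) : Int := (Nat.log2 n.toNat : Int)

-- ===== PORT A =====
def stride_schedule (start : Int × Int) (target : Int × Int) : List (Int × Int) :=
  let H := start.1; let W := start.2
  let h_t := target.1; let w_t := target.2
  let dh : Int :=
    if H > h_t then pyIlog2 (PySem.Int.floordiv H h_t)
    else pyIlog2 (PySem.Int.floordiv h_t H)
  let dw : Int := pyIlog2 (PySem.Int.floordiv W w_t)
  let sch : List (Int × Int) := []
  let sch :=
    if dh < dw then (PySem.List.pyRange 0 (dw - dh) 1).foldl (fun s _ => s ++ [((1:Int), (2:Int))]) sch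
    else if dw < dh then (PySem.List.pyRange 0 (dh - dw) 1).foldl (fun s _ => s ++ [((2:Int), (1:Int))]) sch
    else sch
  (PySem.List.pyRange 0 (min dh dw) 1).foldl (fun s _ => s ++ [((2:Int), (2:Int))]) sch

-- ===== PORT B =====
def stride_schedule_alt (start : Int × Int) (target : Int × Int) : List (Int × Int) :=
  let H := start.1; let W := start.2
  let h_t := target.1; let w_t := target.2
  let dh : Int :=
    if H > h_t then pyIlog2 (PySem.Int.floordiv H h_t)
    else pyIlog2 (PySem.Int.floordiv h_t H)
  let dw : Int := pyIlog2 (PySem.Int.floordiv W w_t)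
  let m : Int := max dh dw
  let sH : List Int := List.replicate (m - dh).toNat 1 ++ List.replicate dh.toNat 2
  let sW : List Int := List.replicate (m - dw).toNat 1 ++ List.replicate dw.toNat 2
  List.zip sH sW

-- ===== PRECONDITION & SPEC =====
-- Pre_ is exactly the set of inputs where the Python A returns: it excludes only
-- ZeroDivisionError on '%'/'//', AssertionError, and ValueError from log2 of a
-- non-positive argument.
def Pre_stride_schedule (start : Int × Int) (target : Int × Int) : Prop :=
  target.1 ≠ 0 ∧ target.2 ≠ 0 ∧
  PySem.Int.mod start.1 target.1 = 0 ∧ PySem.Int.mod start.2 target.2 = 0 ∧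
  (if start.1 > target.1 then 1 ≤ PySem.Int.floordiv start.1 target.1
   else start.1 ≠ 0 ∧ 1 ≤ PySem.Int.floordiv target.1 start.1) ∧
  1 ≤ PySem.Int.floordiv start.2 target.2

instance (start : Int × Int) (target : Int × Int) : Decidable (Pre_stride_schedule start target) := by
  unfold Pre_stride_schedule; infer_instance

def pvWitness_stride_schedule : (Int × Int) × (Int × Int) := ((16, 64), (8, 8))

def Spec_stride_schedule (start : Int × Int) (target : Int × Int) (out : List (Int × Int)) : Prop := out = stride_schedule_alt start target
instance (start : Int × Int) (target : Int × Int) (out : List (Int × Int)) : Decidable (Spec_stride_schedule start target out) := by unfold Spec_stride_schedule; infer_instance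

-- ===== CLAIM (what is proved, stated in full; the proofs are below) =====
def Claim_equal_stride_schedule : Prop := ∀ (start : Int × Int) (target : Int × Int), Dom_stride_schedule start target → Pre_stride_schedule start target → Spec_stride_schedule start target (stride_schedule start target)

-- ===== LEMMAS AND PROOFS =====

-- appending a constant element once per loop iteration = appending a replicate
theorem foldl_append_const {α β : Type} (l : List β) (x : α) :
    ∀ acc : List α, l.foldl (fun s _ => s ++ [x]) acc = acc ++ List.replicate l.length x := by
  induction l with
  | nil => simp
  | cons b t ih =>
    intro acc
    rw [List.foldl, ih, List.length_cons, List.replicate_succ, List.append_assoc]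
    rfl

theorem foldl_pyRange_append_const (n : Int) (x : Int × Int) (acc : List (Int × Int)) :
    (PySem.List.pyRange 0 n 1).foldl (fun s _ => s ++ [x]) acc = acc ++ List.replicate n.toNat x := by
  rw [foldl_append_const, PySem.List.length_pyRange_one]
  norm_num

theorem zip_replicate_same {α β : Type} (n : Nat) (x : α) (y : β) :
    List.zip (List.replicate n x) (List.replicate n y) = List.replicate n (x, y) := by
  induction n with
  | zero => rfl
  | succ k ih => simp [List.replicate_succ, ih]

-- the heart of the equivalence, stated over the two nonnegative halving counts
theorem key_merge (a b : Nat) :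
    (PySem.List.pyRange 0 (min (a : Int) (b : Int)) 1).foldl (fun s _ => s ++ [((2:Int),(2:Int))])
      (if (a : Int) < (b : Int) then
        (PySem.List.pyRange 0 ((b : Int) - (a : Int)) 1).foldl (fun s _ => s ++ [((1:Int),(2:Int))]) []
      else if (b : Int) < (a : Int) then
        (PySem.List.pyRange 0 ((a : Int) - (b : Int)) 1).foldl (fun s _ => s ++ [((2:Int),(1:Int))]) []
      else [])
    = List.zip
        (List.replicate ((max (a : Int) (b : Int) - (a : Int)).toNat) (1:Int) ++ List.replicate ((a : Int)).toNat (2:Int))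
        (List.replicate ((max (a : Int) (b : Int) - (b : Int)).toNat) (1:Int) ++ List.replicate ((b : Int)).toNat (2:Int)) := by
  simp only [foldl_pyRange_append_const, List.nil_append]
  rcases Nat.lt_trichotomy a b with h | h | h
  · have hab : (a : Int) < b := by exact_mod_cast h
    rw [if_pos hab]
    have h1 : ((b : Int) - (a : Int)).toNat = b - a := by omega
    have h2 : (min (a : Int) (b : Int)).toNat = a := by omega
    have h3 : (max (a : Int) (b : Int) - (a : Int)).toNat = b - a := by omega
    have h4 : (max (a : Int) (b : Int) - (b : Int)).toNat = 0 := by omega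
    have h5 : ((a : Int)).toNat = a := by omega
    have h6 : ((b : Int)).toNat = b := by omega
    rw [h1, h2, h3, h4, h5, h6, List.replicate_zero, List.nil_append]
    have hsplit : List.replicate b ((2:Int)) = List.replicate (b - a) 2 ++ List.replicate a 2 := by
      rw [← List.replicate_add]; congr 1; omega
    rw [hsplit, List.zip_append (by simp), zip_replicate_same, zip_replicate_same]
  · subst h
    simp [zip_replicate_same (α := Int) (β := Int)]
  · have hab : (b : Int) < a := by exact_mod_cast h
    rw [if_neg (by omega), if_pos hab]
    have h1 : ((a : Int) - (b : Int)).toNat = a - b := by omega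
    have h2 : (min (a : Int) (b : Int)).toNat = b := by omega
    have h3 : (max (a : Int) (b : Int) - (a : Int)).toNat = 0 := by omega
    have h4 : (max (a : Int) (b : Int) - (b : Int)).toNat = a - b := by omega
    have h5 : ((a : Int)).toNat = a := by omega
    have h6 : ((b : Int)).toNat = b := by omega
    rw [h1, h2, h3, h4, h5, h6, List.replicate_zero, List.nil_append]
    have hsplit : List.replicate a ((2:Int)) = List.replicate (a - b) 2 ++ List.replicate b 2 := by
      rw [← List.replicate_add]; congr 1; omega
    rw [hsplit, List.zip_append (by simp), zip_replicate_same, zip_replicate_same]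

-- ===== VERDICT (by name: the statement is the Claim_ definition above) =====
theorem stride_schedule_spec : Claim_equal_stride_schedule := by
  intro start target _ _
  show stride_schedule start target = stride_schedule_alt start target
  unfold stride_schedule stride_schedule_alt pyIlog2
  by_cases h : start.1 > target.1 <;> simp only [h, if_pos] <;>
    exact key_merge _ _
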